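-- pv_equiv track=rewrite | github.com/haojiehuang/syt_backtest | sbase/sutil.py | calcTimeNum
-- ===== SOURCE A (Python) =====
-- def calcTimeNum(startTime, endTime):
--     if startTime > endTime:
--         return 0
--     aNum = 0
--     aRoundNum = None
--     for aTime in range(int(startTime), int(endTime) + 1):
--         aRoundNum = aTime % 100
--         if aRoundNum <= 59:
--             aNum += 1
--     return aNum
-- ===== SOURCE B (Python) =====
-- def calcTimeNum(startTime, endTime):
--     # closed-form count of t in [startTime, endTime] with t % 100 <= 59
--     if startTime > endTime:
--         return 0
--     def F(x):
--         return 60 * (x // 100) + min(x % 100, 59) + 1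
--     return F(endTime) - F(startTime - 1)
-- ===== Notes on version B (the rewrite author's own statement) =====
-- stated objective: faster
-- what changed: Replaces the per-integer loop over range(startTime, endTime+1) with a closed-form prefix-count F(x)=60*(x//100)+min(x%100,59)+1 evaluated at the two endpoints.
import Mathlib
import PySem

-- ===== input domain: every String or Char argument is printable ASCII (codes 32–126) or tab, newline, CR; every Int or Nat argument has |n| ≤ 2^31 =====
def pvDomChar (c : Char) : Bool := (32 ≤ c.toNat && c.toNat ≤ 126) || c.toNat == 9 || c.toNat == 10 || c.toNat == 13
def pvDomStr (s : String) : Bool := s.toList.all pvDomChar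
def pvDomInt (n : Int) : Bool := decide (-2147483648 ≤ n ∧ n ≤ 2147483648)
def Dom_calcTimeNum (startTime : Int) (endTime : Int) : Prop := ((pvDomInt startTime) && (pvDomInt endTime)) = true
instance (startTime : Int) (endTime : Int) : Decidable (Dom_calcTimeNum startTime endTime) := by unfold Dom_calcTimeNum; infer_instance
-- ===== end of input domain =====

-- B replaces A's per-integer counting loop with a closed-form endpoint formula (O(1) instead of O(endTime-startTime)).

-- ===== PORT A =====
def calcTimeNum (startTime : Int) (endTime : Int) : Int :=
  if startTime > endTime then 0
  else
    (PySem.List.pyRange startTime (endTime + 1) 1).foldl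
      (fun aNum aTime =>
        let aRoundNum := PySem.Int.mod aTime 100
        if aRoundNum ≤ 59 then aNum + 1 else aNum) 0

-- ===== PORT B =====
-- F x = number (up to a constant cancelling between the two endpoints) of t ≤ x with t % 100 ≤ 59
def calcF (x : Int) : Int :=
  60 * PySem.Int.floordiv x 100 + min (PySem.Int.mod x 100) 59 + 1

def calcTimeNum_alt (startTime : Int) (endTime : Int) : Int :=
  if startTime > endTime then 0
  else calcF endTime - calcF (startTime - 1)

-- ===== PRECONDITION & SPEC =====
def Spec_calcTimeNum (startTime : Int) (endTime : Int) (out : Int) : Prop := out = calcTimeNum_alt startTime endTime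
instance (startTime : Int) (endTime : Int) (out : Int) : Decidable (Spec_calcTimeNum startTime endTime out) := by unfold Spec_calcTimeNum; infer_instance

-- ===== CLAIM (what is proved, stated in full; the proofs are below) =====
def Claim_equal_calcTimeNum : Prop := ∀ (startTime : Int) (endTime : Int), Dom_calcTimeNum startTime endTime → Spec_calcTimeNum startTime endTime (calcTimeNum startTime endTime)

-- ===== LEMMAS AND PROOFS =====

theorem calcF_eq (x : Int) : calcF x = 60 * (x / 100) + min (x % 100) 59 + 1 := by
  unfold calcF
  rw [PySem.Int.floordiv_eq_ediv_of_pos (by norm_num), PySem.Int.mod_eq_emod_of_pos (by norm_num)]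

theorem calcF_step (x : Int) :
    calcF x - calcF (x - 1) = (if PySem.Int.mod x 100 ≤ 59 then (1 : Int) else 0) := by
  rw [calcF_eq, calcF_eq, PySem.Int.mod_eq_emod_of_pos (show (0:Int) < 100 by norm_num)]
  rcases le_total (x % 100) 59 with h | h <;>
  rcases le_total ((x - 1) % 100) 59 with h' | h' <;>
  simp [min_def, h, h'] <;> omega

theorem calcLoop_eq (n : Nat) : ∀ (a acc : Int),
    (PySem.List.pyRange a (a + n) 1).foldl
      (fun aNum aTime =>
        let aRoundNum := PySem.Int.mod aTime 100
        if aRoundNum ≤ 59 then aNum + 1 else aNum) acc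
      = acc + (calcF (a + n - 1) - calcF (a - 1)) := by
  induction n with
  | zero => intro a acc; rw [PySem.List.pyRange_one_eq_nil (by omega)]; simp
  | succ m ih =>
    intro a acc
    have : (a + (m + 1 : Nat)) = (a + m) + 1 := by push_cast; ring
    rw [this, PySem.List.pyRange_one_succ_right (by omega), List.foldl_append, ih]
    simp only [List.foldl]
    have he : a + (m : Int) + 1 - 1 = a + m := by ring
    rw [he]
    have hs := calcF_step (a + m)
    split_ifs with h <;> push_cast <;> omega

theorem calcTimeNum_spec' (startTime endTime : Int) :
    calcTimeNum startTime endTime = calcTimeNum_alt startTime endTime := by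
  unfold calcTimeNum calcTimeNum_alt
  split_ifs with h
  · rfl
  · have hle : startTime ≤ endTime := by omega
    have hn : endTime + 1 = startTime + ((endTime + 1 - startTime).toNat : Int) := by omega
    rw [hn, calcLoop_eq]
    have : startTime + ((endTime + 1 - startTime).toNat : Int) - 1 = endTime := by omega
    rw [this]; ring

-- ===== VERDICT (by name: the statement is the Claim_ definition above) =====
theorem calcTimeNum_spec : Claim_equal_calcTimeNum := by
  intro s e _
  unfold Spec_calcTimeNum
  exact calcTimeNum_spec' s e
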